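-- pv_equiv track=rewrite | github.com/Habosjob/Vibe | generate_raw_links.py | generate_raw_urls
-- ===== SOURCE A (Python) =====
-- def sort_files_by_depth(file_paths):
--     files_by_depth = {}
--
--     for path in file_paths:
--         depth = path.count('/')
--         if depth not in files_by_depth:
--             files_by_depth[depth] = []
--         files_by_depth[depth].append(path)
--
--     sorted_files = []
--     for depth in sorted(files_by_depth.keys()):
--         files_by_depth[depth].sort()
--         sorted_files.extend(files_by_depth[depth])
--
--     return sorted_files
--
-- def get_directory_structure(file_paths):
--     directories = set()
--     for path in file_paths:
--         parts = path.split('/')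
--         for i in range(1, len(parts)):
--             dir_path = '/'.join(parts[:i])
--             directories.add(dir_path)
--     return sorted(directories)
--
-- def generate_raw_urls(owner, repo, branch, file_paths):
--     base_url = f"https://raw.githubusercontent.com/{owner}/{repo}/{branch}"
--     sorted_files = sort_files_by_depth(file_paths)
--
--     directories = get_directory_structure(sorted_files)
--
--     files_by_dir = {}
--     for path in sorted_files:
--         dir_name = '/'.join(path.split('/')[:-1]) if '/' in path else ""
--         if dir_name not in files_by_dir:
--             files_by_dir[dir_name] = []
--         files_by_dir[dir_name].append(path)
--
--     raw_urls = []
--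
--     if "" in files_by_dir:
--         if "" in directories:
--             directories.remove("")
--         raw_urls.append(f"\n{'='*60}")
--         raw_urls.append("КОРНЕВАЯ ДИРЕКТОРИЯ:")
--         raw_urls.append(f"{'='*60}\n")
--         for path in files_by_dir[""]:
--             raw_urls.append(f"{base_url}/{path}")
--
--     for dir_path in sorted(directories, key=lambda x: (x.count('/'), x)):
--         if dir_path in files_by_dir:
--             depth = dir_path.count('/')
--             indent = "  " * depth
--             separator = "-" * (60 - depth * 2)
--
--             raw_urls.append(f"\n{indent}{separator}")
--             raw_urls.append(f"{indent}Директория: {dir_path}/")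
--             raw_urls.append(f"{indent}{separator}\n")
--
--             for path in files_by_dir[dir_path]:
--                 raw_urls.append(f"{base_url}/{path}")
--
--     return raw_urls
-- ===== SOURCE B (Python) =====
-- def generate_raw_urls(owner, repo, branch, file_paths):
--     base_url = f"https://raw.githubusercontent.com/{owner}/{repo}/{branch}"
--     depth_name = lambda p: (p.count('/'), p)
--     files_by_dir = {}
--     for path in file_paths:
--         dir_name = '/'.join(path.split('/')[:-1]) if '/' in path else ""
--         files_by_dir.setdefault(dir_name, []).append(path)
--     raw_urls = []
--     if "" in files_by_dir:
--         raw_urls += [f"\n{'='*60}", "КОРНЕВАЯ ДИРЕКТОРИЯ:", f"{'='*60}\n"]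
--         raw_urls += [f"{base_url}/{path}" for path in sorted(files_by_dir[""], key=depth_name)]
--     for dir_path in sorted((k for k in files_by_dir if k != ""), key=depth_name):
--         depth = dir_path.count('/')
--         indent = "  " * depth
--         separator = "-" * (60 - depth * 2)
--         raw_urls += [f"\n{indent}{separator}", f"{indent}Директория: {dir_path}/", f"{indent}{separator}\n"]
--         raw_urls += [f"{base_url}/{path}" for path in sorted(files_by_dir[dir_path], key=depth_name)]
--     return raw_urls
-- ===== Notes on version B (the rewrite author's own statement) =====
-- stated objective: simpler
-- what changed: B drops A's depth-bucketed pre-sort of all files and the ancestor-directory set entirely: one pass groups paths by their directory name, each group is sorted once by the (depth, name) key, and the section order comes from sorting the non-root group keys directly.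
import Mathlib
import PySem

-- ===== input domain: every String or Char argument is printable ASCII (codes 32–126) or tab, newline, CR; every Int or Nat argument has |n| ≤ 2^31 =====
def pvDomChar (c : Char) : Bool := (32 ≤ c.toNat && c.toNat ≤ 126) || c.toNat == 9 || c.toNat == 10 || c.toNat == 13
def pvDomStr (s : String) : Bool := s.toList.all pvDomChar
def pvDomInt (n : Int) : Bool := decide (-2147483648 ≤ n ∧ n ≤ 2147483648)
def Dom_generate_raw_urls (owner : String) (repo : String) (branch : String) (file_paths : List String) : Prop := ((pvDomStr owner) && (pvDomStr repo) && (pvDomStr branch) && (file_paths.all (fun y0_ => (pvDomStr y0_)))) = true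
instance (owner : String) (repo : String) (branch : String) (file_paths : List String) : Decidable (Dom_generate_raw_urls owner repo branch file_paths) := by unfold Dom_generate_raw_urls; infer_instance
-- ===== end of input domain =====

-- B drops A's global depth pre-sort and ancestor-directory set: one grouping pass keyed by
-- directory name, each group sorted by (depth, name); objective: simpler (same output, proved equal).


-- ===== PORT A =====
-- helper sort_files_by_depth (literal: dict keyed by path.count('/') via the
-- `if k not in d: d[k] = []; d[k].append(x)` idiom = Dict.modify; then extend per sorted key)
def pvSortFilesByDepth (file_paths : List String) : List String :=
  let files_by_depth : PySem.Dict Nat (List String) :=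
    file_paths.foldl (fun d path => d.modify (PySem.Str.count path "/") [] (fun g => g ++ [path]))
      PySem.Dict.empty
  (PySem.List.sorted files_by_depth.keys (fun x => x)).foldl
    (fun sorted_files depth =>
      sorted_files ++ PySem.List.sorted (files_by_depth.getD depth []) (fun x => x)) []

-- helper get_directory_structure (literal; path.split('/') = Str.split? with sep "/" ≠ "", always some)
def pvGetDirectoryStructure (file_paths : List String) : List String :=
  let directories : PySem.Set String :=
    file_paths.foldl (fun dirs path =>
      let parts := (PySem.Str.split? path "/").getD []
      (PySem.List.pyRange 1 (PySem.List.len parts)).foldl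
        (fun dirs i => dirs.add (PySem.Str.join "/" (PySem.List.slice parts none (some i)))) dirs)
      PySem.Set.empty
  PySem.List.sorted directories (fun x => x)

def generate_raw_urls (owner : String) (repo : String) (branch : String) (file_paths : List String) : List String :=
  let base_url := "https://raw.githubusercontent.com/" ++ owner ++ "/" ++ repo ++ "/" ++ branch
  let sorted_files := pvSortFilesByDepth file_paths
  let directories := pvGetDirectoryStructure sorted_files
  let files_by_dir : PySem.Dict String (List String) :=
    sorted_files.foldl (fun d path =>
      d.modify (if PySem.Str.isIn "/" path then
          PySem.Str.join "/" (PySem.List.slice ((PySem.Str.split? path "/").getD []) none (some (-1)))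
        else "") [] (fun g => g ++ [path]))
      PySem.Dict.empty
  -- `if "" in files_by_dir:` block (raw_urls part); the nested `directories.remove("")` is split
  -- out just below with the same guard
  let raw_urls : List String :=
    if files_by_dir.contains "" then
      (files_by_dir.getD "" []).foldl (fun acc path => acc ++ [base_url ++ "/" ++ path])
        ["\n" ++ String.ofList (PySem.List.pyRepeat ['='] 60),
         "КОРНЕВАЯ ДИРЕКТОРИЯ:",
         String.ofList (PySem.List.pyRepeat ['='] 60) ++ "\n"]
    else []
  let directories :=
    if files_by_dir.contains "" && directories.contains "" then
      (PySem.List.remove? directories "").getD directories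
    else directories
  (PySem.List.sorted2 directories (fun x => PySem.Str.count x "/") (fun x => x)).foldl
    (fun raw_urls dir_path =>
      if files_by_dir.contains dir_path then
        let depth : Int := (PySem.Str.count dir_path "/" : Int)
        let indent := String.ofList (PySem.List.pyRepeat [' ', ' '] depth)
        let separator := String.ofList (PySem.List.pyRepeat ['-'] (60 - depth * 2))
        (files_by_dir.getD dir_path []).foldl (fun acc path => acc ++ [base_url ++ "/" ++ path])
          (raw_urls ++
            ["\n" ++ indent ++ separator,
             indent ++ "Директория: " ++ dir_path ++ "/",
             indent ++ separator ++ "\n"])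
      else raw_urls)
    raw_urls

-- ===== PORT B =====
def generate_raw_urls_alt (owner : String) (repo : String) (branch : String) (file_paths : List String) : List String :=
  let base_url := "https://raw.githubusercontent.com/" ++ owner ++ "/" ++ repo ++ "/" ++ branch
  -- one grouping pass: d.setdefault(k, []).append(p), i.e. d[k] = d.get(k, []) + [p] = Dict.modify
  let files_by_dir : PySem.Dict String (List String) :=
    file_paths.foldl (fun d path =>
      d.modify (if PySem.Str.isIn "/" path then
          PySem.Str.join "/" (PySem.List.slice ((PySem.Str.split? path "/").getD []) none (some (-1)))
        else "") [] (fun g => g ++ [path]))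
      PySem.Dict.empty
  let raw_urls : List String :=
    if files_by_dir.contains "" then
      ["\n" ++ String.ofList (PySem.List.pyRepeat ['='] 60),
       "КОРНЕВАЯ ДИРЕКТОРИЯ:",
       String.ofList (PySem.List.pyRepeat ['='] 60) ++ "\n"] ++
      (PySem.List.sorted2 (files_by_dir.getD "" []) (fun p => PySem.Str.count p "/") (fun p => p)).map
        (fun path => base_url ++ "/" ++ path)
    else []
  (PySem.List.sorted2 (files_by_dir.keys.filter (fun k => !(k == "")))
      (fun x => PySem.Str.count x "/") (fun x => x)).foldl
    (fun raw_urls dir_path =>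
      let depth : Int := (PySem.Str.count dir_path "/" : Int)
      let indent := String.ofList (PySem.List.pyRepeat [' ', ' '] depth)
      let separator := String.ofList (PySem.List.pyRepeat ['-'] (60 - depth * 2))
      raw_urls ++
        ["\n" ++ indent ++ separator,
         indent ++ "Директория: " ++ dir_path ++ "/",
         indent ++ separator ++ "\n"] ++
        (PySem.List.sorted2 (files_by_dir.getD dir_path []) (fun p => PySem.Str.count p "/") (fun p => p)).map
          (fun path => base_url ++ "/" ++ path))
    raw_urls

-- ===== PRECONDITION & SPEC =====
def Spec_generate_raw_urls (owner : String) (repo : String) (branch : String) (file_paths : List String) (out : List String) : Prop := out = generate_raw_urls_alt owner repo branch file_paths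
instance (owner : String) (repo : String) (branch : String) (file_paths : List String) (out : List String) : Decidable (Spec_generate_raw_urls owner repo branch file_paths out) := by unfold Spec_generate_raw_urls; infer_instance

-- ===== CLAIM (what is proved, stated in full; the proofs are below) =====
def Claim_equal_generate_raw_urls : Prop := ∀ (owner : String) (repo : String) (branch : String) (file_paths : List String), Dom_generate_raw_urls owner repo branch file_paths → Spec_generate_raw_urls owner repo branch file_paths (generate_raw_urls owner repo branch file_paths)

-- ===== LEMMAS AND PROOFS =====

-- depth of a path, and the lexicographic (depth, path) sort key both programs use
def pvCnt (p : String) : Nat := PySem.Str.count p "/"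
def pvK (p : String) : Lex (Nat × String) := toLex (pvCnt p, p)
-- dir_name exactly as both programs compute it
def pvDirOf (path : String) : String :=
  if PySem.Str.isIn "/" path then
    PySem.Str.join "/" (PySem.List.slice ((PySem.Str.split? path "/").getD []) none (some (-1)))
  else ""

theorem pvK_inj : Function.Injective pvK := by
  intro a b h
  have := congrArg (fun x => (ofLex x).2) h
  simpa [pvK] using this

theorem pvK_le_iff (x y : String) :
    pvK x ≤ pvK y ↔ (pvCnt x < pvCnt y ∨ (pvCnt x = pvCnt y ∧ x ≤ y)) := by
  simp [pvK, Prod.Lex.le_iff]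

theorem pv_before_eq :
    (fun a b : String => decide (pvCnt a < pvCnt b) || (!decide (pvCnt b < pvCnt a) && decide (a < b)))
      = fun a b => decide (pvK a < pvK b) := by
  funext a b
  rcases lt_trichotomy (pvCnt a) (pvCnt b) with h|h|h
  · simp [pvK, Prod.Lex.lt_iff, h]
  · simp [pvK, Prod.Lex.lt_iff, h]
  · simp [pvK, Prod.Lex.lt_iff, h, lt_asymm h]
    intro he; omega

-- Python's key=lambda x: (x.count('/'), x) is the lexicographic key pvK
theorem pv_sorted2_eq_sorted (xs : List String) :
    PySem.List.sorted2 xs (fun x => PySem.Str.count x "/") (fun x => x) =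
      PySem.List.sorted xs pvK := by
  simp only [PySem.List.sorted2, PySem.List.sorted, if_neg (by decide : ¬ (false = true))]
  rw [show (fun (a b : String) => decide (PySem.Str.count a "/" < PySem.Str.count b "/") || (!decide (PySem.Str.count b "/" < PySem.Str.count a "/") && decide (a < b))) = fun a b => decide (pvK a < pvK b) from pv_before_eq]

-- the grouping dict both programs build: lookup with default [] is a filter of the input
theorem pv_dict_getD {κ : Type} [BEq κ] [LawfulBEq κ] (l : List String) (key : String → κ) (c : κ) :
    (l.foldl (fun d path => d.modify (key path) [] (fun g => g ++ [path]))
        PySem.Dict.empty).getD c [] =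
      l.filter (fun p => key p == c) := by
  have h1 : (l.map (fun p => (key p, p))).foldl (fun d q => d.modify q.1 [] (fun g => g ++ [q.2])) PySem.Dict.empty
      = l.foldl (fun d path => d.modify (key path) [] (fun g => g ++ [path])) PySem.Dict.empty := by
    rw [List.foldl_map]
  rw [← h1, PySem.Dict.getD_foldl_modify_append]
  simp [List.filter_map, Function.comp_def]

theorem pv_dict_keys {κ : Type} [BEq κ] [LawfulBEq κ] (l : List String) (key : String → κ) :
    (l.foldl (fun d path => d.modify (key path) [] (fun g => g ++ [path]))
        PySem.Dict.empty).keys = PySem.Set.ofList (l.map key) := by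
  rw [PySem.Dict.keys_foldl_modify_key l key [] (fun _ path g => g ++ [path])]
  simp [PySem.Set.update_nil_left]

-- partition of l along distinct covering depth values, each part sorted, is a permutation of l
theorem pv_partition_perm (ds : List Nat) (l : List String) (hnd : ds.Nodup)
    (hcov : ∀ p ∈ l, pvCnt p ∈ ds) :
    (ds.flatMap (fun k => PySem.List.sorted (l.filter (fun p => pvCnt p == k)) (fun x => x))).Perm l := by
  induction ds generalizing l with
  | nil =>
      have : l = [] := by
        cases l with
        | nil => rfl
        | cons x xs => exact absurd (hcov x (by simp)) (by simp)
      simp [this]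
  | cons k ds ih =>
      rw [List.flatMap_cons]
      have hcong : ds.flatMap (fun k' => PySem.List.sorted (l.filter (fun p => pvCnt p == k')) (fun x => x))
          = ds.flatMap (fun k' => PySem.List.sorted ((l.filter (fun p => !(pvCnt p == k))).filter (fun p => pvCnt p == k')) (fun x => x)) := by
        apply List.flatMap_congr
        intro k' hk'
        congr 1
        rw [List.filter_filter]
        apply List.filter_congr
        intro p _
        by_cases h : pvCnt p = k'
        · have : k' ≠ k := fun he => (List.nodup_cons.mp hnd).1 (he ▸ hk')
          simp [h, this]
        · simp [h]
      rw [hcong]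
      have ihp := ih (l.filter (fun p => !(pvCnt p == k))) (List.nodup_cons.mp hnd).2 ?cov
      case cov =>
        intro p hp
        rcases List.mem_filter.mp hp with ⟨hpl, hne⟩
        have := hcov p hpl
        simp at hne
        simpa [hne] using this
      exact (List.Perm.append (PySem.List.sorted_perm _ _ _) ihp).trans (List.filter_append_perm _ l)

theorem pv_group_pairwise (l : List String) (q : String → Bool) (k : Nat)
    (hq : ∀ p, q p = true → pvCnt p = k) :
    (PySem.List.sorted (l.filter q) (fun x => x)).Pairwise (fun a b => pvK a ≤ pvK b) := by
  have hpw := PySem.List.sorted_pairwise (l.filter q) (fun x => x)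
  refine hpw.imp_of_mem ?_
  intro a b ha hb hle
  have hka : pvCnt a = k := hq a (List.of_mem_filter ((PySem.List.mem_sorted _ _ _ _).mp ha))
  have hkb : pvCnt b = k := hq b (List.of_mem_filter ((PySem.List.mem_sorted _ _ _ _).mp hb))
  rw [pvK_le_iff]
  exact Or.inr ⟨hka.trans hkb.symm, hle⟩

-- A's sort_files_by_depth IS the one-shot sort by (depth, name)
theorem pv_sortFiles_eq (l : List String) :
    pvSortFilesByDepth l = PySem.List.sorted l pvK := by
  unfold pvSortFilesByDepth
  rw [PySem.List.foldl_append_eq_flatMap]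
  simp only [pv_dict_getD, pv_dict_keys, List.nil_append]
  set ds := PySem.List.sorted (PySem.Set.ofList (l.map (fun p => PySem.Str.count p "/"))) (fun x => x) with hds
  have hds_nodup : ds.Nodup := ((PySem.List.sorted_perm _ _ _).nodup_iff).mpr (PySem.Set.nodup_ofList _)
  have hds_lt : ds.Pairwise (· < ·) := PySem.List.sorted_ofList_pairwise_lt _
  have hcov : ∀ p ∈ l, pvCnt p ∈ ds := by
    intro p hp
    rw [hds, PySem.List.mem_sorted, PySem.Set.mem_ofList]
    exact List.mem_map.mpr ⟨p, hp, rfl⟩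
  apply PySem.List.eq_of_perm_of_pairwise_le_of_injective pvK pvK_inj
  · exact (pv_partition_perm ds l hds_nodup hcov).trans (PySem.List.sorted_perm l pvK false).symm
  · rw [List.flatMap_def, List.pairwise_flatten]
    constructor
    · intro gl hgl
      rcases List.mem_map.mp hgl with ⟨k, _, rfl⟩
      exact pv_group_pairwise l _ k (fun p h => by simpa [pvCnt] using h)
    · rw [List.pairwise_map]
      refine hds_lt.imp_of_mem ?_
      intro k1 k2 _ _ hlt x hx y hy
      have hkx : pvCnt x = k1 := by
        have := (PySem.List.mem_sorted _ _ _ _).mp hx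
        simpa [pvCnt] using (List.mem_filter.mp this).2
      have hky : pvCnt y = k2 := by
        have := (PySem.List.mem_sorted _ _ _ _).mp hy
        simpa [pvCnt] using (List.mem_filter.mp this).2
      rw [pvK_le_iff]
      exact Or.inl (by omega)
  · exact PySem.List.sorted_pairwise l pvK

-- filtering commutes with the (depth, name) sort
theorem pv_filter_sorted (l : List String) (q : String → Bool) :
    (PySem.List.sorted l pvK).filter q = PySem.List.sorted (l.filter q) pvK := by
  apply PySem.List.eq_of_perm_of_pairwise_le_of_injective pvK pvK_inj
  · exact ((PySem.List.sorted_perm l pvK false).filter q).trans (PySem.List.sorted_perm _ pvK false).symm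
  · exact (PySem.List.sorted_pairwise l pvK).sublist List.filter_sublist
  · exact PySem.List.sorted_pairwise _ pvK

-- membership lower bound for the nested directory-set fold of get_directory_structure
theorem pv_mem_dirs_fold (l : List String) (s : PySem.Set String) (d : String)
    (h : d ∈ s ∨ ∃ p ∈ l, ∃ i ∈ PySem.List.pyRange 1 (PySem.List.len ((PySem.Str.split? p "/").getD [])),
          d = PySem.Str.join "/" (PySem.List.slice ((PySem.Str.split? p "/").getD []) none (some i))) :
    d ∈ l.foldl (fun dirs path =>
      (PySem.List.pyRange 1 (PySem.List.len ((PySem.Str.split? path "/").getD []))).foldl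
        (fun dirs i => dirs.add (PySem.Str.join "/" (PySem.List.slice ((PySem.Str.split? path "/").getD []) none (some i)))) dirs) s := by
  induction l generalizing s with
  | nil => simpa using h
  | cons p l ih =>
      simp only [List.foldl_cons]
      apply ih
      rcases h with hs | ⟨p', hp', hi⟩
      · exact Or.inl (by rw [PySem.Set.mem_foldl_add]; exact Or.inl hs)
      · rcases List.mem_cons.mp hp' with rfl | hmem
        · refine Or.inl ?_
          rw [PySem.Set.mem_foldl_add]
          rcases hi with ⟨i, hirange, rfl⟩
          exact Or.inr ⟨i, hirange, rfl⟩
        · exact Or.inr ⟨p', hmem, hi⟩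

-- a non-root dir name of a member path appears in get_directory_structure's output
theorem pv_mem_dirs (l : List String) (p : String) (hp : p ∈ l) (hne : pvDirOf p ≠ "") :
    pvDirOf p ∈ pvGetDirectoryStructure l := by
  unfold pvGetDirectoryStructure
  rw [PySem.List.mem_sorted]
  apply pv_mem_dirs_fold
  refine Or.inr ⟨p, hp, ?_⟩
  unfold pvDirOf at hne ⊢
  by_cases hin : PySem.Str.isIn "/" p
  · rw [if_pos hin] at hne ⊢
    generalize hparts : (PySem.Str.split? p "/").getD [] = parts at hne ⊢
    by_cases hlen : 2 ≤ parts.length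
    · refine ⟨(parts.length : Int) - 1, ?_, ?_⟩
      · rw [PySem.List.mem_pyRange_one]
        simp only [PySem.List.len_eq]
        omega
      · rw [PySem.List.slice_to_neg_one, PySem.List.slice_to parts (b := (parts.length : Int) - 1) (by omega)]
        rw [List.dropLast_eq_take, show (((parts.length : Int)) - 1).toNat = parts.length - 1 by omega]
    · exfalso
      apply hne
      rw [PySem.List.slice_to_neg_one]
      interval_cases h : parts.length
      · rw [List.length_eq_zero_iff.mp h]; rfl
      · rcases List.length_eq_one_iff.mp h with ⟨x, hx⟩; rw [hx]; rfl
  · rw [if_neg hin] at hne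
    exact absurd rfl hne


theorem pvDirOf_eq (path : String) :
    (if PySem.Str.isIn "/" path = true then
        PySem.Str.join "/" (PySem.List.slice ((PySem.Str.split? path "/").getD []) none (some (-1)))
      else "") = pvDirOf path := rfl

def pvDict (xs : List String) : PySem.Dict String (List String) :=
  xs.foldl (fun d path => d.modify (pvDirOf path) [] (fun g => g ++ [path])) PySem.Dict.empty

theorem pvDict_eq (xs : List String) :
    xs.foldl (fun d path => d.modify (pvDirOf path) [] (fun g => g ++ [path])) PySem.Dict.empty = pvDict xs := rfl

theorem pv_keys_mem (xs : List String) (d : String) :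
    d ∈ (pvDict xs).keys ↔ ∃ p ∈ xs, pvDirOf p = d := by
  unfold pvDict
  rw [pv_dict_keys xs pvDirOf]
  simp [PySem.Set.mem_ofList]

theorem pv_keys_nodup (xs : List String) : (pvDict xs).keys.Nodup := by
  unfold pvDict
  exact PySem.Dict.nodup_keys_foldl_modify_key xs pvDirOf [] (fun _ path g => g ++ [path]) _
    (by simp [PySem.Dict.keys_empty])

theorem pv_contains_fun_eq (l : List String) :
    (pvDict (PySem.List.sorted l pvK)).contains = (pvDict l).contains := by
  funext c
  rw [Bool.eq_iff_iff, PySem.Dict.contains_iff_mem_keys, PySem.Dict.contains_iff_mem_keys,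
    pv_keys_mem, pv_keys_mem]
  constructor
  · rintro ⟨p, hp, rfl⟩
    exact ⟨p, (PySem.List.mem_sorted _ _ _ _).mp hp, rfl⟩
  · rintro ⟨p, hp, rfl⟩
    exact ⟨p, (PySem.List.mem_sorted _ _ _ _).mpr hp, rfl⟩

theorem pv_nodup_foldl_add {α β : Type} [BEq α] [LawfulBEq α] (xs : List β) (f : β → α)
    (s : PySem.Set α) (h : s.Nodup) : (xs.foldl (fun s b => PySem.Set.add s (f b)) s).Nodup := by
  induction xs generalizing s with
  | nil => simpa using h
  | cons b xs ih => exact ih _ (PySem.Set.nodup_add s (f b) h)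

theorem pv_dirs_nodup (xs : List String) : (pvGetDirectoryStructure xs).Nodup := by
  unfold pvGetDirectoryStructure
  apply ((PySem.List.sorted_perm _ _ _).nodup_iff).mpr
  suffices h : ∀ (s : PySem.Set String), s.Nodup →
      (xs.foldl (fun dirs path =>
        (PySem.List.pyRange 1 (PySem.List.len ((PySem.Str.split? path "/").getD []))).foldl
          (fun dirs i => dirs.add (PySem.Str.join "/" (PySem.List.slice ((PySem.Str.split? path "/").getD []) none (some i)))) dirs) s).Nodup by
    exact h PySem.Set.empty (by simp [PySem.Set.empty])
  intro s hs
  induction xs generalizing s with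
  | nil => simpa using hs
  | cons p xs ih =>
      simp only [List.foldl_cons]
      exact ih _ (pv_nodup_foldl_add _ _ _ hs)

-- the directory list A iterates = the non-root keys of the grouping dict, both sorted by (depth, name)
theorem pv_dirlist_eq (l : List String) :
    PySem.List.sorted (List.filter (pvDict l).contains
      (if ((pvDict l).contains "" && (pvGetDirectoryStructure (PySem.List.sorted l pvK)).contains "") = true
       then (PySem.List.remove? (pvGetDirectoryStructure (PySem.List.sorted l pvK)) "").getD
              (pvGetDirectoryStructure (PySem.List.sorted l pvK))
       else pvGetDirectoryStructure (PySem.List.sorted l pvK))) pvK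
    = PySem.List.sorted (List.filter (fun k => !(k == "")) (pvDict l).keys) pvK := by
  apply PySem.List.sorted_eq_sorted_of_perm _ _ pvK pvK_inj
  have hdnodup := pv_dirs_nodup (PySem.List.sorted l pvK)
  have hknodup := pv_keys_nodup l
  have hnodup1 : (List.filter (pvDict l).contains
      (if ((pvDict l).contains "" && (pvGetDirectoryStructure (PySem.List.sorted l pvK)).contains "") = true
       then (PySem.List.remove? (pvGetDirectoryStructure (PySem.List.sorted l pvK)) "").getD
              (pvGetDirectoryStructure (PySem.List.sorted l pvK))
       else pvGetDirectoryStructure (PySem.List.sorted l pvK))).Nodup := by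
    apply List.Nodup.filter
    split
    · rename_i hcond
      have hmem : "" ∈ pvGetDirectoryStructure (PySem.List.sorted l pvK) :=
        List.contains_iff_mem.mp (Bool.and_elim_right hcond)
      rw [PySem.List.remove?_eq_some_erase _ _ hmem]
      exact hdnodup.erase _
    · exact hdnodup
  have hnodup2 : (List.filter (fun k => !(k == "")) (pvDict l).keys).Nodup := hknodup.filter _
  rw [List.perm_ext_iff_of_nodup hnodup1 hnodup2]
  intro d
  rw [List.mem_filter, List.mem_filter]
  constructor
  · rintro ⟨hmem, hcont⟩
    refine ⟨?_, ?_⟩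
    · rw [PySem.Dict.contains_iff_mem_keys] at hcont
      exact hcont
    · -- d ≠ ""
      simp only [Bool.not_eq_eq_eq_not, Bool.not_true, beq_eq_false_iff_ne, ne_eq]
      intro hd
      subst hd
      revert hmem
      split
      · rename_i hcond
        have hmem0 : "" ∈ pvGetDirectoryStructure (PySem.List.sorted l pvK) :=
          List.contains_iff_mem.mp (Bool.and_elim_right hcond)
        rw [PySem.List.remove?_eq_some_erase _ _ hmem0]
        intro hmem
        exact ((hdnodup.mem_erase_iff).mp hmem).1 rfl
      · rename_i hcond
        intro hmem
        rw [Bool.and_eq_true] at hcond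
        push Not at hcond
        have h2 := hcond hcont
        exact absurd (List.contains_iff_mem.mpr hmem) (by simpa using h2)
  · rintro ⟨hkey, hne⟩
    have hne' : d ≠ "" := by simpa using hne
    have hcont : (pvDict l).contains d = true := by
      rw [PySem.Dict.contains_iff_mem_keys]; exact hkey
    refine ⟨?_, hcont⟩
    rcases (pv_keys_mem l d).mp hkey with ⟨p, hp, rfl⟩
    have hmemd : pvDirOf p ∈ pvGetDirectoryStructure (PySem.List.sorted l pvK) :=
      pv_mem_dirs _ p ((PySem.List.mem_sorted _ _ _ _).mpr hp) hne'
    split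
    · rename_i hcond
      have hmem0 : "" ∈ pvGetDirectoryStructure (PySem.List.sorted l pvK) :=
        List.contains_iff_mem.mp (Bool.and_elim_right hcond)
      rw [PySem.List.remove?_eq_some_erase _ _ hmem0]
      exact (hdnodup.mem_erase_iff).mpr ⟨hne', hmemd⟩
    · exact hmemd

-- ===== VERDICT (by name: the statement is the Claim_ definition above) =====
theorem generate_raw_urls_spec : Claim_equal_generate_raw_urls := by
  intro owner repo branch l _
  unfold Spec_generate_raw_urls generate_raw_urls generate_raw_urls_alt
  rw [pv_sortFiles_eq]
  simp only [pv_sorted2_eq_sorted, pv_dict_getD, pv_filter_sorted,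
    PySem.List.foldl_append_singleton_eq_map, PySem.List.foldl_if_eq_foldl_filter]
  simp only [pvDirOf_eq, pvDict_eq, pv_contains_fun_eq, pv_dirlist_eq]
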